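-- pv_equiv track=rewrite | github.com/sys-ryan/algorithm-test | 0331/1759.py | check
-- ===== SOURCE A (Python) =====
-- def check(password):
--   mo = 0
--   ja = 0
--   for x in password:
--     if x in 'aeiou':
--       mo += 1
--     else:
--       ja += 1
--
--   return ja >= 2 and mo >= 1
-- ===== SOURCE B (Python) =====
-- def check(password):
--   # Stage 1: does a vowel exist at all?  (short-circuits at the first vowel)
--   if not any(c in 'aeiou' for c in password):
--     return False
--   # Stage 2: look for two consonants, returning True the moment the second is seen.
--   seen = 0
--   for c in password:
--     if c not in 'aeiou':
--       seen += 1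
--       if seen == 2:
--         return True
--   return False
-- ===== Notes on version B (the rewrite author's own statement) =====
-- stated objective: alternative
-- what changed: B replaces A's single full-pass double-counter with two staged short-circuiting searches: an any() existence test for a vowel, then a scan that returns True the moment a second consonant is found, so no full counts are ever computed.
import Mathlib
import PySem

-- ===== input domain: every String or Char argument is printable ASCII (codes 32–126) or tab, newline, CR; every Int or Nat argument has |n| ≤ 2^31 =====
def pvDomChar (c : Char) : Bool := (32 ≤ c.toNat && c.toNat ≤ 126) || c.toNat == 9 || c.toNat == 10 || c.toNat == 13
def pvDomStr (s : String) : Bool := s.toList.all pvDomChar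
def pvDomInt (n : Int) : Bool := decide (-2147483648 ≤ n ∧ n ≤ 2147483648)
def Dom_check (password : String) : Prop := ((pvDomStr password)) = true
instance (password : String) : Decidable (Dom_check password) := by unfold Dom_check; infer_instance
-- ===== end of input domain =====

-- B replaces A's full-pass double-counter loop by two staged short-circuiting searches
-- (any-vowel test, then a scan that stops at the second consonant); alternative decomposition.

-- x in 'aeiou'
def isVowel (c : Char) : Bool := c ∈ "aeiou".toList

-- ===== PORT A =====
-- one loop accumulating (mo, ja)
def check (password : String) : Bool :=
  let p := password.toList.foldl
    (fun (s : Int × Int) x => if isVowel x then (s.1 + 1, s.2) else (s.1, s.2 + 1))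
    (0, 0)
  decide (p.2 ≥ 2) && decide (p.1 ≥ 1)

-- ===== PORT B =====
-- stage 2 loop: return True the moment the second consonant is seen
def consScan : List Char → Nat → Bool
  | [], _ => false
  | c :: t, seen =>
    if !isVowel c then
      if seen + 1 == 2 then true else consScan t (seen + 1)
    else consScan t seen

def check_alt (password : String) : Bool :=
  if !(password.toList.any isVowel) then false
  else consScan password.toList 0

-- ===== PRECONDITION & SPEC =====
def Spec_check (password : String) (out : Bool) : Prop := out = check_alt password
instance (password : String) (out : Bool) : Decidable (Spec_check password out) := by unfold Spec_check; infer_instance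

-- ===== CLAIM (what is proved, stated in full; the proofs are below) =====
def Claim_equal_check : Prop := ∀ (password : String), Dom_check password → Spec_check password (check password)

-- ===== LEMMAS AND PROOFS =====

theorem check_foldl_inv (l : List Char) (mo ja : Int) :
    l.foldl (fun (s : Int × Int) x => if isVowel x then (s.1 + 1, s.2) else (s.1, s.2 + 1)) (mo, ja)
      = (mo + (l.filter isVowel).length, ja + (l.filter (fun c => !isVowel c)).length) := by
  induction l generalizing mo ja with
  | nil => simp
  | cons c t ih =>
    simp only [List.foldl_cons, List.filter_cons]
    by_cases h : isVowel c <;> simp [h, ih] <;> ring_nf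

theorem consScan_eq (l : List Char) (seen : Nat) (h : seen < 2) :
    consScan l seen = decide (2 ≤ seen + (l.filter (fun c => !isVowel c)).length) := by
  induction l generalizing seen with
  | nil => simp [consScan]; omega
  | cons c t ih =>
    simp only [consScan, List.filter_cons]
    by_cases hv : isVowel c
    · simp [hv, ih seen h]
    · simp only [hv, Bool.not_false, if_true, List.length_cons]
      by_cases h2 : seen + 1 = 2
      · simp only [show (seen + 1 == 2) = true by simp [h2], if_true]
        symm; rw [decide_eq_true_iff]; omega
      · have hb : (seen + 1 == 2) = false := by simp; omega
        simp only [hb]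
        rw [if_neg (by simp), ih (seen + 1) (by omega), decide_eq_decide]
        omega

theorem any_eq_filter (l : List Char) :
    l.any isVowel = decide (1 ≤ (l.filter isVowel).length) := by
  induction l with
  | nil => simp
  | cons c t ih => by_cases h : isVowel c <;> simp [h, ih]

-- ===== VERDICT (by name: the statement is the Claim_ definition above) =====
theorem check_spec : Claim_equal_check := by
  intro password _
  unfold Spec_check check check_alt
  rw [show ((0 : Int), (0 : Int)) = ((0 : Int), (0 : Int)) from rfl, check_foldl_inv,
      consScan_eq _ 0 (by omega), any_eq_filter]
  by_cases hv : 1 ≤ (password.toList.filter isVowel).length <;>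
    by_cases hj : 2 ≤ (password.toList.filter (fun c => !isVowel c)).length <;>
      simp [hv, hj]
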